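-- pv_equiv track=rewrite | github.com/ymoola/APS106-Python | lab5.py | email_to_name
-- ===== SOURCE A (Python) =====
-- def email_to_name(email):
--     """
--     (str) -> str
--
--     Given a string with the format "first_name.last_name@domain.com",
--     return a string "LAST_NAME,FIRST_NAME" where all the characters are upper
--     case
--
--
--     >>> email_to_name("anna.conda@mail.utoronto.ca")
--     'CONDA,ANNA'
--     """
--
--     first = ''
--     last = ''
--     flag = True
--     for i in email:
--         if flag:
--             if i != '.':
--                 first += i
--             else:
--                 flag = False
--         else:
--             if i != '@':
--                 last += i
--             else:
--                 break
--     last = last.upper()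
--     first = first.upper()
--     return last+','+first
-- ===== SOURCE B (Python) =====
-- def email_to_name(email):
--     dot = email.find('.')
--     if dot == -1:
--         first, last = email, ''
--     else:
--         first = email[:dot]
--         rest = email[dot + 1:]
--         at = rest.find('@')
--         last = rest if at == -1 else rest[:at]
--     return last.upper() + ',' + first.upper()
-- ===== Notes on version B (the rewrite author's own statement) =====
-- stated objective: idiomatic
-- what changed: Replaces the char-by-char flag/break loop with index-based delimiter search: find the first dot, slice out first, find the first at-sign in the remainder, slice out last.
import Mathlib
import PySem

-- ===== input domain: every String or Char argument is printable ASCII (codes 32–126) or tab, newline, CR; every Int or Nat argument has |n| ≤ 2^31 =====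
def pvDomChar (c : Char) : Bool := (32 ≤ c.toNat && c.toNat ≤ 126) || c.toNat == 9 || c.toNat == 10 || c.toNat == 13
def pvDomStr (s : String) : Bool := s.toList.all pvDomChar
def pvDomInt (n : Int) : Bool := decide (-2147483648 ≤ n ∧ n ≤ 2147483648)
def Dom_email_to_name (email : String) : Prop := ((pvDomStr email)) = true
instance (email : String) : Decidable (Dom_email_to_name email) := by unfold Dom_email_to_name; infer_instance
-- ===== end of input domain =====

-- B replaces A's char-by-char flag/break loop with index-based delimiter search
-- (find the first '.', slice out `first`, find the first '@' in the rest, slice out `last`);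
-- same O(n) cost, a more idiomatic decomposition.

-- ===== PORT A =====
-- A's loop after the flag flips: accumulate into `last` until '@' (break) or end of string.
def etnGoLast (cs : List Char) (last : List Char) : List Char :=
  match cs with
  | [] => last
  | c :: rest => if c ≠ '@' then etnGoLast rest (last ++ [c]) else last

-- A's loop while flag is True: accumulate into `first` until '.', then continue in etnGoLast.
def etnGoFirst (cs : List Char) (first : List Char) : List Char × List Char :=
  match cs with
  | [] => (first, [])
  | c :: rest => if c ≠ '.' then etnGoFirst rest (first ++ [c]) else (first, etnGoLast rest [])

def email_to_name (email : String) : String :=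
  let fl := etnGoFirst email.toList []
  String.mk (PySem.Chars.upper fl.2 ++ ',' :: PySem.Chars.upper fl.1)

-- ===== PORT B =====
def email_to_name_alt (email : String) : String :=
  let cs := email.toList
  let dot := PySem.Chars.find cs ['.']
  let fl : List Char × List Char :=
    if dot = -1 then (cs, [])
    else
      let first := PySem.List.slice cs none (some dot)
      let rest := PySem.List.slice cs (some (dot + 1)) none
      let at_ := PySem.Chars.find rest ['@']
      (first, if at_ = -1 then rest else PySem.List.slice rest none (some at_))
  String.mk (PySem.Chars.upper fl.2 ++ ',' :: PySem.Chars.upper fl.1)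

-- ===== PRECONDITION & SPEC =====
def Spec_email_to_name (email : String) (out : String) : Prop := out = email_to_name_alt email
instance (email : String) (out : String) : Decidable (Spec_email_to_name email out) := by unfold Spec_email_to_name; infer_instance

-- ===== CLAIM (what is proved, stated in full; the proofs are below) =====
def Claim_equal_email_to_name : Prop := ∀ (email : String), Dom_email_to_name email → Spec_email_to_name email (email_to_name email)

-- ===== LEMMAS AND PROOFS =====

theorem etn_single_prefix (c : Char) (l : List Char) : [c] <+: l ↔ l.head? = some c := by
  cases l with
  | nil => simp
  | cons a t => simp [List.cons_prefix_cons, eq_comm]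

theorem etn_tw_not_mem (cs : List Char) (c : Char) (h : c ∉ cs) :
    cs.takeWhile (· ≠ c) = cs ∧ cs.dropWhile (· ≠ c) = [] := by
  induction cs with
  | nil => simp
  | cons a t ih =>
    simp at h
    have h1 := (ih h.2).1
    have h2 := (ih h.2).2
    have ha : a ≠ c := Ne.symm h.1
    simp [ha]
    exact fun x hx hxc => h.2 (hxc ▸ hx)

theorem etn_tw_take (cs : List Char) (c : Char) (n : Nat)
    (hn : cs[n]? = some c) (hmin : ∀ i, i < n → cs[i]? ≠ some c) :
    cs.takeWhile (· ≠ c) = cs.take n := by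
  induction cs generalizing n with
  | nil => simp at hn
  | cons a t ih =>
    cases n with
    | zero =>
      simp at hn
      simp [hn]
    | succ m =>
      have ha : a ≠ c := by
        intro hac
        exact hmin 0 (by omega) (by simp [hac])
      have hn' : t[m]? = some c := by simpa using hn
      have hmin' : ∀ i, i < m → t[i]? ≠ some c := by
        intro i hi
        have := hmin (i + 1) (by omega)
        simpa using this
      have := ih m hn' hmin'
      simp [ha]
      simpa using this

-- takeWhile/dropWhile are take/drop at the takeWhile length
theorem etn_tw_gen (cs : List Char) (p : Char → Bool) :
    cs.takeWhile p = cs.take (cs.takeWhile p).length ∧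
    cs.dropWhile p = cs.drop (cs.takeWhile p).length := by
  set k := (cs.takeWhile p).length with hk
  have h1 : cs.takeWhile p = cs.take k := List.prefix_iff_eq_take.1 (List.takeWhile_prefix p)
  have h2 : cs.takeWhile p ++ cs.dropWhile p = cs := List.takeWhile_append_dropWhile
  have h3 : cs.take k ++ cs.drop k = cs := List.take_append_drop _ _
  rw [← h1] at h3
  exact ⟨h1, List.append_cancel_left (h2.trans h3.symm)⟩

-- characterization of s.find(c) for a single character
theorem etn_find_char (cs : List Char) (c : Char) :
    PySem.Chars.find cs [c] =
      if c ∈ cs then ((cs.takeWhile (· ≠ c)).length : Int) else -1 := by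
  by_cases hm : c ∈ cs
  · have hinf : [c] <:+: cs := by
      obtain ⟨s, t, hst⟩ := List.append_of_mem hm
      exact ⟨s, t, by simp [hst]⟩
    have hnn : 0 ≤ PySem.Chars.find cs [c] := (PySem.Chars.find_nonneg_iff cs [c]).2 hinf
    obtain ⟨hp, hmin⟩ := PySem.Chars.find_spec hnn
    set m := (PySem.Chars.find cs [c]).toNat with hmdef
    have hcm : cs[m]? = some c := by
      have := (etn_single_prefix c (cs.drop m)).1 hp
      simpa [List.head?_drop] using this
    have hminm : ∀ i, i < m → cs[i]? ≠ some c := by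
      intro i hi hic
      exact hmin i hi ((etn_single_prefix c (cs.drop i)).2 (by simpa [List.head?_drop] using hic))
    have hlt : m < cs.length := by
      by_contra h
      rw [List.getElem?_eq_none (by omega)] at hcm
      simp at hcm
    have htw := etn_tw_take cs c m hcm hminm
    rw [if_pos hm, htw, List.length_take]
    omega
  · rw [if_neg hm]
    refine (PySem.Chars.find_eq_neg_one_iff cs [c]).2 ?_
    intro h
    exact hm (h.subset (by simp))

-- A's inner loop is takeWhile (· ≠ '@')
theorem etnGoLast_eq (cs : List Char) (acc : List Char) :
    etnGoLast cs acc = acc ++ cs.takeWhile (· ≠ '@') := by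
  induction cs generalizing acc with
  | nil => simp [etnGoLast]
  | cons a t ih =>
    by_cases ha : a = '@'
    · simp [etnGoLast, ha]
    · simp [etnGoLast, ha, ih]

-- A's outer loop: first = takeWhile (· ≠ '.'), last = takeWhile (· ≠ '@') of what follows the first '.'
theorem etnGoFirst_eq (cs : List Char) (acc : List Char) :
    etnGoFirst cs acc =
      (acc ++ cs.takeWhile (· ≠ '.'),
       ((cs.dropWhile (· ≠ '.')).drop 1).takeWhile (· ≠ '@')) := by
  induction cs generalizing acc with
  | nil => simp [etnGoFirst]
  | cons a t ih =>
    by_cases ha : a = '.'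
    · simp [etnGoFirst, ha, etnGoLast_eq]
    · simp [etnGoFirst, ha, ih]

-- ===== VERDICT (by name: the statement is the Claim_ definition above) =====
theorem email_to_name_spec : Claim_equal_email_to_name := by
  intro email _
  unfold Spec_email_to_name email_to_name email_to_name_alt
  simp only []
  set cs := email.toList with hcs
  rw [etnGoFirst_eq, etn_find_char]
  by_cases hdot : '.' ∈ cs
  · rw [if_pos hdot]
    set n := (cs.takeWhile (· ≠ '.')).length with hn
    have hne : (n : Int) ≠ -1 := by omega
    rw [if_neg hne]
    have hgen := etn_tw_gen cs (· ≠ '.')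
    have hfirst : PySem.List.slice cs none (some (n : Int)) = cs.takeWhile (· ≠ '.') := by
      rw [PySem.List.slice_to_natCast, ← hgen.1]
    have hrest : PySem.List.slice cs (some ((n : Int) + 1)) none =
        (cs.dropWhile (· ≠ '.')).drop 1 := by
      have : ((n : Int) + 1) = ((n + 1 : Nat) : Int) := by push_cast; ring
      rw [this, PySem.List.slice_from_natCast, hgen.2, ← List.drop_drop]
    rw [hfirst, hrest]
    set rest := (cs.dropWhile (· ≠ '.')).drop 1 with hrestdef
    rw [etn_find_char]
    by_cases hat : '@' ∈ rest
    · rw [if_pos hat]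
      set k := (rest.takeWhile (· ≠ '@')).length with hk
      have hkne : (k : Int) ≠ -1 := by omega
      rw [if_neg hkne, PySem.List.slice_to_natCast, ← (etn_tw_gen rest (· ≠ '@')).1]
      simp
    · rw [if_neg hat, if_pos rfl, (etn_tw_not_mem rest '@' hat).1]
      simp
  · rw [if_neg hdot, if_pos rfl, (etn_tw_not_mem cs '.' hdot).2,
        (etn_tw_not_mem cs '.' hdot).1]
    simp
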